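-- pv_equiv track=rewrite | github.com/cirosantilli/cirosantilli.github.io | euler/948.py | winners_for_word
-- ===== SOURCE A (Python) =====
-- from functools import lru_cache
--
-- def winners_for_word(s):
--     """Return (winner_if_Left_starts, winner_if_Right_starts) for a given word s."""
--     n = len(s)
--
--     @lru_cache(None)
--     def solve(i, j, player):
--         # player: 0 = Left, 1 = Right
--         if i == j:
--             return s[i]  # 'L' or 'R'
--
--         if player == 0:  # Left to move
--             desired, other = 'L', 'R'
--             for k in range(1, j - i + 1):  # remove k from the left (1..j-i)
--                 w = solve(i + k, j, 1)
--                 if w == desired: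
--                     return desired
--             return other
--         else:  # Right to move
--             desired, other = 'R', 'L'
--             for k in range(1, j - i + 1):  # remove k from the right
--                 w = solve(i, j - k, 0)
--                 if w == desired:
--                     return desired
--             return other
--
--     wl = solve(0, n - 1, 0)
--     wr = solve(0, n - 1, 1)
--     return wl, wr
-- ===== SOURCE B (Python) =====
-- def winners_for_word(s):
--     """Return (winner_if_Left_starts, winner_if_Right_starts) for a given word s."""
--     n = len(s)
--     if n == 0:
--         return ('R', 'L')
--     # F[i] / G[i]: game value of s[i..i+l] with Left / Right to move, for the
--     # current interval length l (l = 0 initially: the single letter itself).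
--     F = list(s)
--     G = list(s)
--     # accL[j]: running OR over k in (i, j] of "G-value of s[k..j] is 'L'";
--     # accR[i]: running OR over m in [i, j) of "F-value of s[i..m] is 'R'".
--     accL = [False] * n
--     accR = [False] * n
--     for l in range(1, n):
--         nF = []
--         nG = []
--         for i in range(n - l):
--             j = i + l
--             accL[j] = accL[j] or G[i + 1] == 'L'
--             accR[i] = accR[i] or F[i] == 'R'
--             nF.append('L' if accL[j] else 'R')
--             nG.append('R' if accR[i] else 'L')
--         F, G = nF, nG
--     return (F[0], G[0])
-- ===== Notes on version B (the rewrite author's own statement) =====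
-- stated objective: faster
-- what changed: Replaces A's memoized top-down game search, whose recursion re-scans all O(n) sub-intervals of each of the O(n^2) intervals, by a bottom-up DP over interval lengths that keeps one running OR per fixed left/right endpoint, so each interval costs O(1).
import Mathlib
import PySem

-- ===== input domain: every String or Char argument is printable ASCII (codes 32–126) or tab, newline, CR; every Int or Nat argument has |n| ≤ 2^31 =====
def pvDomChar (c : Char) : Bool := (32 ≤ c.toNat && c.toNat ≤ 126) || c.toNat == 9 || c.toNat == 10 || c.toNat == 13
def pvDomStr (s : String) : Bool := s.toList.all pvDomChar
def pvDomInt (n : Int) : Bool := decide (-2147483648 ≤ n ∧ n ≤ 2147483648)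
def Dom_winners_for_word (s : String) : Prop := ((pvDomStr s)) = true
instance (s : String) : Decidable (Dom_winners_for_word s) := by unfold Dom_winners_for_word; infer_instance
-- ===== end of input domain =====

-- B replaces A's memoized top-down game search (each interval rescans all its sub-intervals)
-- by a bottom-up interval DP over lengths that keeps one running OR per fixed endpoint; objective: faster.

-- ===== PORT A =====
-- A's inner 'solve(i, j, player)' (the lru_cache only memoizes; values are identical).
-- The 'for k in range(...): if w == desired: return desired / return other' loop is exactly
-- an existence test over the range, written with List.any on an attached range (attach only
-- supplies the membership fact needed for termination). In the i = j base case Python's s[i]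
-- (a 1-char string) is always in range on reachable calls; the .getD "" default is never hit
-- from winners_for_word.
def solveA (t : List Char) (i j player : Int) : String :=
  if i = j then ((PySem.List.pyGet? t i).map (fun c => String.ofList [c])).getD ""
  else if player = 0 then
    if (PySem.List.pyRange 1 (j - i + 1) 1).attach.any
        (fun k => solveA t (i + k.1) j 1 == "L") then "L" else "R"
  else
    if (PySem.List.pyRange 1 (j - i + 1) 1).attach.any
        (fun k => solveA t i (j - k.1) 0 == "R") then "R" else "L"
termination_by (j - i).toNat
decreasing_by
  · have h := (PySem.List.mem_pyRange_one).mp k.2; omega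
  · have h := (PySem.List.mem_pyRange_one).mp k.2; omega

-- Python returns the pair (wl, wr); under the grader's signature it is the 2-element list [wl, wr].
def winners_for_word (s : String) : List String :=
  let n : Int := PySem.Str.len s
  let wl := solveA s.toList 0 (n - 1) 0
  let wr := solveA s.toList 0 (n - 1) 1
  [wl, wr]

-- ===== PORT B =====
-- One inner-loop iteration of Source B: state (nF, nG, accL, accR);
-- Python's in-place 'accL[j] = accL[j] or ...' / 'accR[i] = ...' become pySetD,
-- the two appends build the next rows back-to-front via ++ [·].
def altInnerStep (l : Int) (F G : List String)
    (st : List String × List String × List Bool × List Bool) (i : Int) :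
    List String × List String × List Bool × List Bool :=
  match st with
  | (nF, nG, aL, aR) =>
    let j := i + l
    let aL' := PySem.List.pySetD aL j
        (PySem.List.pyGetD aL j false || (PySem.List.pyGetD G (i + 1) "" == "L"))
    let aR' := PySem.List.pySetD aR i
        (PySem.List.pyGetD aR i false || (PySem.List.pyGetD F i "" == "R"))
    (nF ++ [if PySem.List.pyGetD aL' j false then "L" else "R"],
     nG ++ [if PySem.List.pyGetD aR' i false then "R" else "L"],
     aL', aR')

-- one outer iteration: F, G := the freshly built nF, nG; accL, accR are threaded through.
def altOuterStep (n : Int)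
    (st : List String × List String × List Bool × List Bool) (l : Int) :
    List String × List String × List Bool × List Bool :=
  (PySem.List.pyRange 0 (n - l) 1).foldl (altInnerStep l st.1 st.2.1) ([], [], st.2.2.1, st.2.2.2)

def winners_for_word_alt (s : String) : List String :=
  let n : Int := PySem.Str.len s
  if n = 0 then ["R", "L"]
  else
    let init := s.toList.map (fun c => String.ofList [c])   -- list(s)
    let res := (PySem.List.pyRange 1 n 1).foldl (altOuterStep n)
        (init, init, List.replicate n.toNat false, List.replicate n.toNat false)
    [PySem.List.pyGetD res.1 0 "", PySem.List.pyGetD res.2.1 0 ""]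

-- ===== PRECONDITION & SPEC =====
def Spec_winners_for_word (s : String) (out : List String) : Prop := out = winners_for_word_alt s
instance (s : String) (out : List String) : Decidable (Spec_winners_for_word s out) := by unfold Spec_winners_for_word; infer_instance

-- ===== CLAIM (what is proved, stated in full; the proofs are below) =====
def Claim_equal_winners_for_word : Prop := ∀ (s : String), Dom_winners_for_word s → Spec_winners_for_word s (winners_for_word s)

-- ===== LEMMAS AND PROOFS =====

lemma solveA_base (t : List Char) (i : Nat) (hi : i < t.length) :
    solveA t (i : Int) (i : Int) 0 = String.ofList [t[i]] ∧
    solveA t (i : Int) (i : Int) 1 = String.ofList [t[i]] := by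
  rw [solveA.eq_def, solveA.eq_def]
  simp [hi]

lemma solve0_cases (t : List Char) {i j : Int} (h : i < j) :
    solveA t i j 0 = "L" ∨ solveA t i j 0 = "R" := by
  rw [solveA.eq_def, if_neg h.ne, if_pos rfl]
  split_ifs <;> simp

lemma solve1_cases (t : List Char) {i j : Int} (h : i < j) :
    solveA t i j 1 = "L" ∨ solveA t i j 1 = "R" := by
  rw [solveA.eq_def, if_neg h.ne, if_neg (by norm_num)]
  split_ifs <;> simp

lemma solve0_eq_L_iff (t : List Char) {i j : Int} (h : i < j) :
    solveA t i j 0 = "L" ↔ ∃ k : Int, i + 1 ≤ k ∧ k ≤ j ∧ solveA t k j 1 = "L" := by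
  rw [solveA.eq_def, if_neg h.ne, if_pos rfl]
  by_cases hc : ((PySem.List.pyRange 1 (j - i + 1) 1).attach.any
      (fun k => solveA t (i + k.1) j 1 == "L")) = true
  · rw [if_pos hc]
    simp only [List.any_eq_true, List.mem_attach, true_and, Subtype.exists,
      PySem.List.mem_pyRange_one, beq_iff_eq] at hc
    obtain ⟨k, ⟨h1, h2⟩, h3⟩ := hc
    exact iff_of_true rfl ⟨i + k, by omega, by omega, h3⟩
  · rw [if_neg hc]
    simp only [List.any_eq_true, List.mem_attach, true_and, Subtype.exists,
      PySem.List.mem_pyRange_one, beq_iff_eq, not_exists] at hc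
    constructor
    · intro hr; exact absurd hr (by decide)
    · rintro ⟨k, h1, h2, h3⟩
      have := hc (k - i) ⟨by omega, by omega⟩
      rw [show i + (k - i) = k by ring] at this
      exact absurd h3 this


lemma solve1_eq_R_iff (t : List Char) {i j : Int} (h : i < j) :
    solveA t i j 1 = "R" ↔ ∃ m : Int, i ≤ m ∧ m < j ∧ solveA t i m 0 = "R" := by
  rw [solveA.eq_def, if_neg h.ne, if_neg (by norm_num)]
  by_cases hc : ((PySem.List.pyRange 1 (j - i + 1) 1).attach.any
      (fun k => solveA t i (j - k.1) 0 == "R")) = true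
  · rw [if_pos hc]
    simp only [List.any_eq_true, List.mem_attach, true_and, Subtype.exists,
      PySem.List.mem_pyRange_one, beq_iff_eq] at hc
    obtain ⟨k, ⟨h1, h2⟩, h3⟩ := hc
    exact iff_of_true rfl ⟨j - k, by omega, by omega, h3⟩
  · rw [if_neg hc]
    simp only [List.any_eq_true, List.mem_attach, true_and, Subtype.exists,
      PySem.List.mem_pyRange_one, beq_iff_eq, not_exists] at hc
    constructor
    · intro hr; exact absurd hr (by decide)
    · rintro ⟨m, h1, h2, h3⟩
      have := hc (j - m) ⟨by omega, by omega⟩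
      rw [show j - (j - m) = m by ring] at this
      exact absurd h3 this



def ALP (t : List Char) (l j : Nat) : Prop :=
  ∃ k : Int, (j : Int) - l + 1 ≤ k ∧ 1 ≤ k ∧ k ≤ (j : Int) ∧ solveA t k j 1 = "L"

def ARP (t : List Char) (l i : Nat) : Prop :=
  ∃ m : Int, (i : Int) ≤ m ∧ m ≤ (i : Int) + l - 1 ∧ m ≤ (t.length : Int) - 2 ∧
    solveA t (i : Int) m 0 = "R"

def InvSt (t : List Char) (l : Nat) (st : List String × List String × List Bool × List Bool) : Prop :=
  st.1.length = t.length - l ∧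
  st.2.1.length = t.length - l ∧
  st.2.2.1.length = t.length ∧
  st.2.2.2.length = t.length ∧
  (∀ i, i < t.length - l → st.1[i]? = some (solveA t (i : Int) ((i : Int) + l) 0)) ∧
  (∀ i, i < t.length - l → st.2.1[i]? = some (solveA t (i : Int) ((i : Int) + l) 1)) ∧
  (∀ j, j < t.length → (st.2.2.1[j]? = some true ↔ ALP t l j)) ∧
  (∀ i, i < t.length → (st.2.2.2[i]? = some true ↔ ARP t l i))

def PartInv (t : List Char) (l p : Nat) (st : List String × List String × List Bool × List Bool) : Prop :=
  st.1.length = p ∧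
  st.2.1.length = p ∧
  st.2.2.1.length = t.length ∧
  st.2.2.2.length = t.length ∧
  (∀ i, i < p → st.1[i]? = some (solveA t (i : Int) ((i : Int) + l) 0)) ∧
  (∀ i, i < p → st.2.1[i]? = some (solveA t (i : Int) ((i : Int) + l) 1)) ∧
  (∀ j, j < t.length → (st.2.2.1[j]? = some true ↔
      (if l ≤ j ∧ j < l + p then ALP t l j else ALP t (l - 1) j))) ∧
  (∀ i, i < t.length → (st.2.2.2[i]? = some true ↔
      (if i < p then ARP t l i else ARP t (l - 1) i)))

lemma ALP_succ (t : List Char) (l j : Nat) (hl : 1 ≤ l) (hlj : l ≤ j) :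
    ALP t l j ↔ (ALP t (l - 1) j ∨ solveA t ((j : Int) - l + 1) j 1 = "L") := by
  unfold ALP
  constructor
  · rintro ⟨k, h1, h2, h3, h4⟩
    by_cases hk : k = (j : Int) - l + 1
    · right; rw [← hk]; exact h4
    · left; exact ⟨k, by omega, by omega, by omega, h4⟩
  · rintro (⟨k, h1, h2, h3, h4⟩ | h)
    · exact ⟨k, by omega, by omega, by omega, h4⟩
    · exact ⟨(j : Int) - l + 1, by omega, by omega, by omega, h⟩

lemma ARP_succ (t : List Char) (l i : Nat) (hl : 1 ≤ l) (hin : i + l < t.length) :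
    ARP t l i ↔ (ARP t (l - 1) i ∨ solveA t (i : Int) ((i : Int) + l - 1) 0 = "R") := by
  unfold ARP
  constructor
  · rintro ⟨m, h1, h2, h3, h4⟩
    by_cases hm : m = (i : Int) + l - 1
    · right; rw [← hm]; exact h4
    · left; exact ⟨m, by omega, by omega, by omega, h4⟩
  · rintro (⟨m, h1, h2, h3, h4⟩ | h)
    · exact ⟨m, by omega, by omega, by omega, h4⟩
    · exact ⟨(i : Int) + l - 1, by omega, by omega, by omega, h⟩

lemma ALP_low2 (t : List Char) {l l' j : Nat} (h : j ≤ l) (h' : j ≤ l') :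
    ALP t l j ↔ ALP t l' j := by
  unfold ALP
  constructor <;> (rintro ⟨k, h1, h2, h3, h4⟩; exact ⟨k, by omega, by omega, by omega, h4⟩)

lemma ARP_high2 (t : List Char) {l l' i : Nat} (h : t.length ≤ i + l + 1)
    (h' : t.length ≤ i + l' + 1) : ARP t l i ↔ ARP t l' i := by
  unfold ARP
  constructor <;> (rintro ⟨m, h1, h2, h3, h4⟩; exact ⟨m, by omega, by omega, by omega, h4⟩)

lemma inner_fold (t : List Char) (l : Nat) (hl : 1 ≤ l) (hlN : l < t.length)
    (F G : List String) (aL0 aR0 : List Bool)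
    (hInv : InvSt t (l - 1) (F, G, aL0, aR0)) (p : Nat) (hp : p ≤ t.length - l) :
    PartInv t l p ((List.range p).foldl
        (fun st (k : Nat) => altInnerStep (l : Int) F G st (k : Int)) ([], [], aL0, aR0)) := by
  obtain ⟨hF, hG, haL, haR, hFv, hGv, haLv, haRv⟩ := hInv
  simp only at hF hG haL haR hFv hGv haLv haRv
  induction p with
  | zero =>
    refine ⟨by simp, by simp, by simpa using haL, by simpa using haR, ?_, ?_, ?_, ?_⟩
    · intro i hi; omega
    · intro i hi; omega
    · intro j hj
      rw [if_neg (show ¬(l ≤ j ∧ j < l + 0) by omega)]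
      simpa using haLv j hj
    · intro i hi
      rw [if_neg (show ¬(i < 0) by omega)]
      simpa using haRv i hi
  | succ p ih =>
    obtain ⟨pF, pG, paL, paR, pFv, pGv, paLv, paRv⟩ := ih (by omega)
    set st := (List.range p).foldl (fun st (k : Nat) => altInnerStep (l : Int) F G st (k : Int))
      ([], [], aL0, aR0) with hst
    rw [List.range_succ, List.foldl_append, ← hst]
    -- one step
    have hpl : p + l < t.length := by omega
    have hpl1 : p + 1 < t.length - (l - 1) := by omega
    -- the two reads from the carried arrays
    obtain ⟨b, hb⟩ : ∃ b : Bool, st.2.2.1[p + l]? = some b :=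
      ⟨st.2.2.1[p + l]'(by omega), List.getElem?_eq_getElem _⟩
    obtain ⟨b', hb'⟩ : ∃ b : Bool, st.2.2.2[p]? = some b :=
      ⟨st.2.2.2[p]'(by omega), List.getElem?_eq_getElem _⟩
    have hbiff : b = true ↔ ALP t (l - 1) (p + l) := by
      have := paLv (p + l) (by omega)
      rw [hb] at this
      constructor
      · intro h; subst h
        have h2 := this.mp rfl
        rwa [if_neg (show ¬(l ≤ p + l ∧ p + l < l + p) by omega)] at h2
      · intro h
        rcases b with _ | _
        · exfalso
          have := this.mpr (by rw [if_neg (show ¬(l ≤ p + l ∧ p + l < l + p) by omega)]; exact h)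
          simp at this
        · rfl
    have hbiff' : b' = true ↔ ARP t (l - 1) p := by
      have := paRv p (by omega)
      rw [hb'] at this
      constructor
      · intro h; subst h
        have h2 := this.mp rfl
        rwa [if_neg (show ¬(p < p) by omega)] at h2
      · intro h
        rcases b' with _ | _
        · exfalso
          have := this.mpr (by rw [if_neg (show ¬(p < p) by omega)]; exact h)
          simp at this
        · rfl
    -- reads from F and G (the length-(l-1) rows)
    have hGread : G[p + 1]? = some (solveA t ((p : Int) + 1) ((p : Int) + l) 1) := by
      have := hGv (p + 1) hpl1
      rw [this]
      congr 2
      push_cast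
      omega
    have hFread : F[p]? = some (solveA t (p : Int) ((p : Int) + l - 1) 0) := by
      have := hFv p (by omega)
      rw [this]
      congr 2
      omega
    -- names for the two written Bool values
    set vL : Bool := b || (solveA t ((p : Int) + 1) ((p : Int) + l) 1 == "L") with hvLdef
    set vR : Bool := b' || (solveA t (p : Int) ((p : Int) + l - 1) 0 == "R") with hvRdef
    have hcastj : ((p : Int) + l) = ((p + l : Nat) : Int) := by push_cast; ring
    have hcastp1 : ((p : Int) + 1) = ((p + 1 : Nat) : Int) := by push_cast; ring
    -- the one-step unfolding of altInnerStep at index p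
    have hstep : altInnerStep (l : Int) F G st (p : Int) =
        (st.1 ++ [if vL then "L" else "R"], st.2.1 ++ [if vR then "R" else "L"],
         st.2.2.1.set (p + l) vL, st.2.2.2.set p vR) := by
      show (st.1 ++ [_], st.2.1 ++ [_], _, _) = _
      have e1 : PySem.List.pyGetD st.2.2.1 ((p : Int) + l) false = b := by
        rw [hcastj, PySem.List.pyGetD_natCast, List.getD_eq_getElem?_getD, hb]; rfl
      have e2 : PySem.List.pyGetD G ((p : Int) + 1) "" =
          solveA t ((p : Int) + 1) ((p : Int) + l) 1 := by
        rw [hcastp1, PySem.List.pyGetD_natCast, List.getD_eq_getElem?_getD, hGread]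
        rw [← hcastp1]; rfl
      have e3 : PySem.List.pyGetD st.2.2.2 (p : Int) false = b' := by
        rw [PySem.List.pyGetD_natCast, List.getD_eq_getElem?_getD, hb']; rfl
      have e4 : PySem.List.pyGetD F (p : Int) "" = solveA t (p : Int) ((p : Int) + l - 1) 0 := by
        rw [PySem.List.pyGetD_natCast, List.getD_eq_getElem?_getD, hFread]; rfl
      have e5 : PySem.List.pySetD st.2.2.1 ((p : Int) + l) vL = st.2.2.1.set (p + l) vL := by
        rw [hcastj, PySem.List.pySetD_natCast]
      have e6 : PySem.List.pySetD st.2.2.2 (p : Int) vR = st.2.2.2.set p vR := by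
        rw [PySem.List.pySetD_natCast]
      rw [e1, e2, e3, e4]
      rw [← hvLdef, ← hvRdef, e5, e6]
      have e7 : PySem.List.pyGetD (st.2.2.1.set (p + l) vL) ((p : Int) + l) false = vL := by
        rw [hcastj, PySem.List.pyGetD_natCast, List.getD_eq_getElem?_getD,
          List.getElem?_set_self (by omega)]; rfl
      have e8 : PySem.List.pyGetD (st.2.2.2.set p vR) (p : Int) false = vR := by
        rw [PySem.List.pyGetD_natCast, List.getD_eq_getElem?_getD,
          List.getElem?_set_self (by omega)]; rfl
      rw [e7, e8]
    rw [List.foldl_cons, List.foldl_nil, hstep]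
    -- value of the new accL cell
    have hvL : vL = true ↔ ALP t l (p + l) := by
      rw [hvLdef, Bool.or_eq_true, hbiff, beq_iff_eq,
        ALP_succ t l (p + l) hl (by omega)]
      have h9 : ((p + l : Nat) : Int) - l + 1 = (p : Int) + 1 := by push_cast; ring
      rw [h9, hcastj]
    have hvR : vR = true ↔ ARP t l p := by
      rw [hvRdef, Bool.or_eq_true, hbiff', beq_iff_eq,
        ARP_succ t l p hl (by omega)]
    -- values of the two appended row entries
    have hnewF : (if vL then "L" else "R") = solveA t (p : Int) ((p : Int) + l) 0 := by
      by_cases hv : vL = true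
      · rw [if_pos hv]
        obtain ⟨k, h1, h2, h3, h4⟩ := hvL.mp hv
        rw [← hcastj] at h4
        exact ((solve0_eq_L_iff t (show (p : Int) < (p : Int) + l by omega)).mpr
          ⟨k, by omega, by omega, h4⟩).symm
      · rw [if_neg hv]
        rcases solve0_cases t (show (p : Int) < (p : Int) + l by omega) with hL | hR
        · exfalso
          obtain ⟨k, h1, h2, h3⟩ := (solve0_eq_L_iff t
            (show (p : Int) < (p : Int) + l by omega)).mp hL
          rw [hcastj] at h3
          exact hv (hvL.mpr ⟨k, by omega, by omega, by omega, h3⟩)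
        · exact hR.symm
    have hnewG : (if vR then "R" else "L") = solveA t (p : Int) ((p : Int) + l) 1 := by
      by_cases hv : vR = true
      · rw [if_pos hv]
        obtain ⟨m, h1, h2, h3, h4⟩ := hvR.mp hv
        exact ((solve1_eq_R_iff t (show (p : Int) < (p : Int) + l by omega)).mpr
          ⟨m, by omega, by omega, h4⟩).symm
      · rw [if_neg hv]
        rcases solve1_cases t (show (p : Int) < (p : Int) + l by omega) with hL | hR
        · exact hL.symm
        · exfalso
          obtain ⟨m, h1, h2, h3⟩ := (solve1_eq_R_iff t
            (show (p : Int) < (p : Int) + l by omega)).mp hR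
          exact hv (hvR.mpr ⟨m, by omega, by omega, by omega, h3⟩)
    -- the eight conjuncts
    refine ⟨by simp [pF], by simp [pG], by simp [paL], by simp [paR], ?_, ?_, ?_, ?_⟩
    · intro i hi
      rcases Nat.lt_succ_iff_lt_or_eq.mp hi with hi' | rfl
      · rw [List.getElem?_append_left (by omega), pFv i hi']
      · have hcat := List.getElem?_concat_length (l := st.1)
          (a := if vL then "L" else "R")
        rw [pF] at hcat
        rw [hcat, hnewF]
    · intro i hi
      rcases Nat.lt_succ_iff_lt_or_eq.mp hi with hi' | rfl
      · rw [List.getElem?_append_left (by omega), pGv i hi']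
      · have hcat := List.getElem?_concat_length (l := st.2.1)
          (a := if vR then "R" else "L")
        rw [pG] at hcat
        rw [hcat, hnewG]
    · intro j hj
      by_cases hjl : j = p + l
      · subst hjl
        rw [List.getElem?_set_self (by omega),
          if_pos (show l ≤ p + l ∧ p + l < l + (p + 1) by omega)]
        simp [hvL]
      · rw [List.getElem?_set_ne (by omega), paLv j hj]
        by_cases hc : l ≤ j ∧ j < l + p
        · rw [if_pos hc, if_pos (by omega)]
        · rw [if_neg hc, if_neg (by omega)]
    · intro i hi
      by_cases hip : i = p
      · subst hip
        rw [List.getElem?_set_self (by omega), if_pos (show i < i + 1 by omega)]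
        simp [hvR]
      · rw [List.getElem?_set_ne (by omega), paRv i hi]
        by_cases hc : i < p
        · rw [if_pos hc, if_pos (by omega)]
        · rw [if_neg hc, if_neg (by omega)]

lemma outer_step (t : List Char) (l : Nat) (hl : 1 ≤ l) (hlN : l < t.length)
    (st : List String × List String × List Bool × List Bool)
    (hInv : InvSt t (l - 1) st) :
    InvSt t l (altOuterStep (t.length : Int) st (l : Int)) := by
  have hrange : PySem.List.pyRange 0 ((t.length : Int) - l) 1 =
      (List.range (t.length - l)).map Int.ofNat := by
    rw [PySem.List.pyRange_one,
      show (((t.length : Int) - l) - 0).toNat = t.length - l from by omega]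
    simp
  have hfold : altOuterStep (t.length : Int) st (l : Int) =
      (List.range (t.length - l)).foldl
        (fun s2 (k : Nat) => altInnerStep (l : Int) st.1 st.2.1 s2 (k : Int))
        ([], [], st.2.2.1, st.2.2.2) := by
    unfold altOuterStep
    rw [hrange, List.foldl_map]
    rfl
  rw [hfold]
  have hpart := inner_fold t l hl hlN st.1 st.2.1 st.2.2.1 st.2.2.2 hInv
    (t.length - l) (le_refl _)
  obtain ⟨pF, pG, paL, paR, pFv, pGv, paLv, paRv⟩ := hpart
  refine ⟨pF, pG, paL, paR, pFv, pGv, ?_, ?_⟩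
  · intro j hj
    rw [paLv j hj]
    by_cases hc : l ≤ j
    · rw [if_pos ⟨hc, by omega⟩]
    · rw [if_neg (by omega)]
      exact ALP_low2 t (by omega) (by omega)
  · intro i hi
    rw [paRv i hi]
    by_cases hc : i < t.length - l
    · rw [if_pos hc]
    · rw [if_neg hc]
      exact ARP_high2 t (by omega) (by omega)

lemma outer_fold (t : List Char) (hN : 1 ≤ t.length) (q : Nat) (hq : q ≤ t.length - 1) :
    InvSt t q ((List.range q).foldl
      (fun st (k : Nat) => altOuterStep (t.length : Int) st (1 + (k : Int)))
      (t.map (fun c => String.ofList [c]), t.map (fun c => String.ofList [c]),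
       List.replicate t.length false, List.replicate t.length false)) := by
  induction q with
  | zero =>
    refine ⟨by simp, by simp, by simp, by simp, ?_, ?_, ?_, ?_⟩
    · intro i hi
      simp only [List.range_zero, List.foldl_nil, List.getElem?_map]
      rw [List.getElem?_eq_getElem (by omega)]
      have h0 := (solveA_base t i (by omega)).1
      simp only [Nat.cast_zero, add_zero]
      rw [h0]
      rfl
    · intro i hi
      simp only [List.range_zero, List.foldl_nil, List.getElem?_map]
      rw [List.getElem?_eq_getElem (by omega)]
      have h0 := (solveA_base t i (by omega)).2
      simp only [Nat.cast_zero, add_zero]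
      rw [h0]
      rfl
    · intro j hj
      simp only [List.range_zero, List.foldl_nil, List.getElem?_replicate, if_pos hj]
      constructor
      · intro h; simp at h
      · rintro ⟨k, h1, h2, h3, h4⟩
        exfalso; omega
    · intro i hi
      simp only [List.range_zero, List.foldl_nil, List.getElem?_replicate, if_pos hi]
      constructor
      · intro h; simp at h
      · rintro ⟨m, h1, h2, h3, h4⟩
        exfalso; omega
  | succ q ih =>
    rw [List.range_succ, List.foldl_append, List.foldl_cons, List.foldl_nil]
    have hstep := outer_step t (1 + q) (by omega) (by omega) _ (by
      have := ih (by omega)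
      simpa using this)
    have hc : ((1 + q : Nat) : Int) = 1 + (q : Int) := by push_cast; ring
    rw [hc] at hstep
    rw [show q + 1 = 1 + q from by omega]
    simpa using hstep

theorem main (s : String) : winners_for_word s = winners_for_word_alt s := by
  unfold winners_for_word winners_for_word_alt
  have hlen : PySem.Str.len s = (s.toList.length : Int) := by
    simp [PySem.Str.len_eq]
  set t := s.toList with ht
  by_cases h0 : t.length = 0
  · rw [hlen, h0]
    simp only [Nat.cast_zero, zero_sub]
    rw [solveA.eq_def, solveA.eq_def]
    norm_num
  · have hN : 1 ≤ t.length := by omega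
    rw [hlen, if_neg (by omega)]
    simp only
    have hrange : PySem.List.pyRange 1 (t.length : Int) 1 =
        (List.range (t.length - 1)).map (fun k : Nat => 1 + (k : Int)) := by
      rw [PySem.List.pyRange_one,
        show ((t.length : Int) - 1).toNat = t.length - 1 from by omega]
    have htoNat : ((t.length : Int)).toNat = t.length := by omega
    rw [hrange, List.foldl_map, htoNat]
    have hinv := outer_fold t hN (t.length - 1) (le_refl _)
    obtain ⟨pF, pG, paL, paR, pFv, pGv, paLv, paRv⟩ := hinv
    have hF0 := pFv 0 (by omega)
    have hG0 := pGv 0 (by omega)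
    have hcast : ((0 : Nat) : Int) + ((t.length - 1 : Nat) : Int) = (t.length : Int) - 1 := by
      push_cast [Nat.cast_sub hN]
      ring
    rw [hcast] at hF0 hG0
    rw [PySem.List.pyGetD_zero, PySem.List.pyGetD_zero,
      List.getD_eq_getElem?_getD, List.getD_eq_getElem?_getD, hF0, hG0]
    rfl

-- ===== VERDICT (by name: the statement is the Claim_ definition above) =====
theorem winners_for_word_spec : Claim_equal_winners_for_word := by
  intro s _
  exact main s
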